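-- pv_equiv track=rewrite | github.com/SantiRR31/proyectoC | utils/utils.py | agrupar_partidas_por_grupo
-- ===== SOURCE A (Python) =====
-- def agrupar_partidas_por_grupo(partidas_mes):
--     grupos = {}
--     for codigo, total_cargo in partidas_mes:
--         codigo_str = str(codigo)
--         if len(codigo_str) == 5:
--             grupo = int(codigo_str[:2]) * 100
--         elif len(codigo_str) == 4:
--             grupo = int(codigo_str[:2]) * 100
--         elif len(codigo_str) == 3:
--             grupo = int(codigo_str[0]) * 100
--         else:
--             grupo = int(codigo)
--         if grupo not in grupos:
--             grupos[grupo] = []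
--         grupos[grupo].append((codigo, total_cargo))
--     return grupos
-- ===== SOURCE B (Python) =====
-- def agrupar_partidas_por_grupo(partidas_mes):
--     def clave(codigo):
--         s = str(codigo)
--         if len(s) == 5 or len(s) == 4:
--             return int(s[:2]) * 100
--         if len(s) == 3:
--             return int(s[0]) * 100
--         return int(codigo)
--
--     con_clave = [(clave(c), (c, t)) for c, t in partidas_mes]
--     orden = []
--     for g, _ in con_clave:
--         if g not in orden:
--             orden.append(g)
--     return {g: [p for k, p in con_clave if k == g] for g in orden}
-- ===== Notes on version B (the rewrite author's own statement) =====
-- stated objective: alternative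
-- what changed: A builds the dict in one pass by appending each entry to a mutable per-group list; B decomposes the task: it first maps every entry to its group key, collects the distinct keys in first-occurrence order, then builds each group's list with a per-key filter comprehension.
import Mathlib
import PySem

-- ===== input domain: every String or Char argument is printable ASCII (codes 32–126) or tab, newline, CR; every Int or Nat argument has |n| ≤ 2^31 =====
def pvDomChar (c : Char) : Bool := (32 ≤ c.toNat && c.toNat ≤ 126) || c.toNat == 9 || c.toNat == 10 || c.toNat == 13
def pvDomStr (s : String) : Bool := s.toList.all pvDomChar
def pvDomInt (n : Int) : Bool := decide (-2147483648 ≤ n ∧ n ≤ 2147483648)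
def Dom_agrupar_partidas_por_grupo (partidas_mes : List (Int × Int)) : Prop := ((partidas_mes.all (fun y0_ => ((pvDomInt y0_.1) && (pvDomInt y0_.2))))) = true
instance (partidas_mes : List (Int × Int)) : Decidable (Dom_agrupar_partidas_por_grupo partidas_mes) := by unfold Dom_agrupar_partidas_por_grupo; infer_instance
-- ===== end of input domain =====

-- B replaces A's single-pass dict-of-appended-lists by a two-phase decomposition (key every entry,
-- dedup the keys in first-occurrence order, then one filter per key); same cost class, no speed claim.

-- ===== PORT A =====
-- A's group-key derivation: str(codigo), branch on length.  PySem.Int.ofChars? returns none exactly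
-- where Python's int() raises (only reachable outside Pre_, e.g. int('-')); '.getD 0' there is never
-- relied upon inside Pre_.
def pvClaveA (codigo : Int) : Int :=
  let s := PySem.Int.toChars codigo
  if s.length = 5 then ((PySem.Int.ofChars? (PySem.List.slice s none (some 2))).getD 0) * 100
  else if s.length = 4 then ((PySem.Int.ofChars? (PySem.List.slice s none (some 2))).getD 0) * 100
  else if s.length = 3 then ((PySem.Int.ofChars? ((PySem.List.pyGet? s 0).elim [] (fun c => [c]))).getD 0) * 100
  else codigo

-- the body of A's for-loop
def pvStepA (grupos : PySem.Dict Int (List (Int × Int))) (ct : Int × Int) :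
    PySem.Dict Int (List (Int × Int)) :=
  let grupo := pvClaveA ct.1
  let grupos := if grupos.contains grupo then grupos else grupos.insert grupo []
  grupos.modify grupo [] (· ++ [ct])

def agrupar_partidas_por_grupo (partidas_mes : List (Int × Int)) : List (Int × List (Int × Int)) :=
  (partidas_mes.foldl pvStepA PySem.Dict.empty).items

-- ===== PORT B =====
-- B's key function (identical derivation, the 5/4 branches merged with 'or').
def pvClaveB (codigo : Int) : Int :=
  let s := PySem.Int.toChars codigo
  if s.length = 5 ∨ s.length = 4 then ((PySem.Int.ofChars? (PySem.List.slice s none (some 2))).getD 0) * 100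
  else if s.length = 3 then ((PySem.Int.ofChars? ((PySem.List.pyGet? s 0).elim [] (fun c => [c]))).getD 0) * 100
  else codigo

def agrupar_partidas_por_grupo_alt (partidas_mes : List (Int × Int)) : List (Int × List (Int × Int)) :=
  let conClave := partidas_mes.map (fun ct => (pvClaveB ct.1, ct))
  let orden := conClave.foldl (fun o q => if q.1 ∈ o then o else o ++ [q.1]) []
  orden.map (fun g => (g, (conClave.filter (fun q => q.1 == g)).map (·.2)))

-- ===== PRECONDITION & SPEC =====
-- Pre_ excludes exactly the inputs on which A raises: a codigo in [-99,-10] has str of length 3,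
-- and int(str(codigo)[0]) = int('-') raises ValueError.  (B raises there too.)
def Pre_agrupar_partidas_por_grupo (partidas_mes : List (Int × Int)) : Prop :=
  ∀ p ∈ partidas_mes, ¬(-99 ≤ p.1 ∧ p.1 ≤ -10)
instance (partidas_mes : List (Int × Int)) : Decidable (Pre_agrupar_partidas_por_grupo partidas_mes) := by
  unfold Pre_agrupar_partidas_por_grupo; infer_instance

def pvWitness_agrupar_partidas_por_grupo : (List (Int × Int)) := [(101, 5), (2305, 7), (150, -2), (-12345, 9)]

def Spec_agrupar_partidas_por_grupo (partidas_mes : List (Int × Int)) (out : List (Int × List (Int × Int))) : Prop := out = agrupar_partidas_por_grupo_alt partidas_mes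
instance (partidas_mes : List (Int × Int)) (out : List (Int × List (Int × Int))) : Decidable (Spec_agrupar_partidas_por_grupo partidas_mes out) := by unfold Spec_agrupar_partidas_por_grupo; infer_instance

-- ===== CLAIM (what is proved, stated in full; the proofs are below) =====
def Claim_equal_agrupar_partidas_por_grupo : Prop := ∀ (partidas_mes : List (Int × Int)), Dom_agrupar_partidas_por_grupo partidas_mes → Pre_agrupar_partidas_por_grupo partidas_mes → Spec_agrupar_partidas_por_grupo partidas_mes (agrupar_partidas_por_grupo partidas_mes)

-- ===== LEMMAS AND PROOFS =====

-- The two key derivations agree.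
theorem pvClaveB_eq (codigo : Int) : pvClaveB codigo = pvClaveA codigo := by
  unfold pvClaveA pvClaveB
  dsimp only
  split_ifs with h1 h2 h3 <;> simp_all

-- A's guarded insert-then-append step is the unguarded modify step.
theorem pvStepA_eq (d : PySem.Dict Int (List (Int × Int))) (ct : Int × Int) :
    pvStepA d ct = d.modify (pvClaveA ct.1) [] (· ++ [ct]) := by
  unfold pvStepA
  dsimp only
  by_cases h : d.contains (pvClaveA ct.1)
  · simp [h]
  · have h' : d.contains (pvClaveA ct.1) = false := by simpa using h
    simp [h', PySem.Dict.modify, PySem.Dict.getD_insert_self, PySem.Dict.insert_insert_self,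
      PySem.Dict.getD_of_not_contains (h := h')]

theorem pvStepA_funext :
    pvStepA = fun (d : PySem.Dict Int (List (Int × Int))) ct => d.modify (pvClaveA ct.1) [] (· ++ [ct]) :=
  funext fun d => funext fun ct => pvStepA_eq d ct

theorem pv_witness_ok :
    Dom_agrupar_partidas_por_grupo pvWitness_agrupar_partidas_por_grupo ∧
    Pre_agrupar_partidas_por_grupo pvWitness_agrupar_partidas_por_grupo := by decide

-- ===== VERDICT (by name: the statement is the Claim_ definition above) =====
theorem agrupar_partidas_por_grupo_spec : Claim_equal_agrupar_partidas_por_grupo := by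
  intro pm _ _
  unfold Spec_agrupar_partidas_por_grupo agrupar_partidas_por_grupo agrupar_partidas_por_grupo_alt
  simp only [pvClaveB_eq]
  rw [pvStepA_funext,
    ← List.foldl_map (f := fun (ct : Int × Int) => (pvClaveA ct.1, ct))
      (g := fun (d : PySem.Dict Int (List (Int × Int))) (q : Int × (Int × Int)) => d.modify q.1 [] (· ++ [q.2]))]
  set l := pm.map (fun ct => (pvClaveA ct.1, ct)) with hl
  -- the dedup loop on the B side is Set.ofList of the keys
  have horden : l.foldl (fun (o : List Int) (q : Int × (Int × Int)) => if q.1 ∈ o then o else o ++ [q.1]) []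
      = PySem.Set.ofList (l.map Prod.fst) := by
    have hb : (fun (o : List Int) (q : Int × (Int × Int)) => if q.1 ∈ o then o else o ++ [q.1])
        = fun o q => PySem.Set.add o q.1 := by
      funext o q; rw [PySem.Set.add_eq_ite]
    rw [hb, ← PySem.Set.update_map_eq_foldl_add, PySem.Set.update_nil_left]
  -- keys of A's dict, in order
  have hnd : (l.foldl (fun d q => d.modify q.1 [] (· ++ [q.2])) PySem.Dict.empty).keys.Nodup := by
    exact PySem.Dict.nodup_keys_foldl_modify_key l Prod.fst [] (fun d q v => v ++ [q.2])
      PySem.Dict.empty PySem.Dict.nodup_keys_empty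
  have hkeys : (l.foldl (fun d q => d.modify q.1 [] (· ++ [q.2])) PySem.Dict.empty).keys
      = PySem.Set.ofList (l.map Prod.fst) := by
    rw [PySem.Dict.keys_foldl_modify_key]
    simp [PySem.Set.update_nil_left]
  rw [PySem.Dict.items_eq_map_keys _ hnd [], hkeys, horden]
  refine List.map_congr_left (fun g _ => ?_)
  simp [PySem.Dict.getD_foldl_modify_append]
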